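-- pv_equiv track=rewrite | github.com/raphael-group/comet | comet/mutation_data.py | convert_p2m_to_int
-- ===== SOURCE A (Python) =====
-- def convert_p2m_to_int(patients, genes, patient2mutations):
--     iP2G = []
--     for patient in patient2mutations:
--         mutated_genes = []
--         for i in range(len(genes)):
--             if genes[i] in patient2mutations[patient]:
--                 mutated_genes.append(i)
--         iP2G.append(mutated_genes)
--     return iP2G
-- ===== SOURCE B (Python) =====
-- def convert_p2m_to_int(patients, genes, patient2mutations):
--     gene2idx = {}
--     for i, g in enumerate(genes):
--         gene2idx.setdefault(g, []).append(i)
--     iP2G = []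
--     for patient in patient2mutations:
--         idxs = {i for g in patient2mutations[patient] for i in gene2idx.get(g, [])}
--         iP2G.append(sorted(idxs))
--     return iP2G
-- ===== Notes on version B (the rewrite author's own statement) =====
-- stated objective: faster
-- what changed: Instead of scanning all genes and testing list membership for every patient, B builds a gene->indices dict once, maps each patient's mutation list to indices and sorts them.
import Mathlib
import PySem

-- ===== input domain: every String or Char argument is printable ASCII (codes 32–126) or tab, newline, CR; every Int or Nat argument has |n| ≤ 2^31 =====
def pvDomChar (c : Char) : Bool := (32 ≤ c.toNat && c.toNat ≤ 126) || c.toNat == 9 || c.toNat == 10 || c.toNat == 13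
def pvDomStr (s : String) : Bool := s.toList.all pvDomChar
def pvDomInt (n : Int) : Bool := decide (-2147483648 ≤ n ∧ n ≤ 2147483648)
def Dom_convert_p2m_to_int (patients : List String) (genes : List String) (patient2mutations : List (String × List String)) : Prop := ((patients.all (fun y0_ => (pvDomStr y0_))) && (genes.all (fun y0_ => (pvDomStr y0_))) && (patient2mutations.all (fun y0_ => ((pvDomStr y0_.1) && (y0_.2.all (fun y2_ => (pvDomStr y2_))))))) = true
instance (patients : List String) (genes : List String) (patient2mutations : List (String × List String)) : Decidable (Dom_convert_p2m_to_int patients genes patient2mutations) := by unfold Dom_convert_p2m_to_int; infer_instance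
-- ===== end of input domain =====

-- B replaces A's per-patient scan over all genes (with a list-membership test per gene) by a
-- gene→indices dict built once, mapping each patient's mutations to indices and sorting (faster).

-- ===== PORT A =====
-- for patient in patient2mutations: for i in range(len(genes)):
--   if genes[i] in patient2mutations[patient]: mutated_genes.append(i)
def convert_p2m_to_int (patients : List String) (genes : List String) (patient2mutations : List (String × List String)) : List (List Int) :=
  patient2mutations.foldl (fun iP2G ent =>
    iP2G ++ [ (PySem.List.pyRange 0 (genes.length : Int) 1).foldl (fun mutated_genes i =>
        if ((PySem.Dict.mk patient2mutations).getD ent.1 []).contains (PySem.List.pyGetD genes i "") then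
          mutated_genes ++ [i]
        else mutated_genes) [] ]) []

-- ===== PORT B =====
-- gene2idx built by setdefault/append over enumerate(genes); per patient: sorted set of indices
def convert_p2m_to_int_alt (patients : List String) (genes : List String) (patient2mutations : List (String × List String)) : List (List Int) :=
  let gene2idx : PySem.Dict String (List Int) :=
    (PySem.List.enumerate genes 0).foldl (fun d p => d.modify p.2 [] (· ++ [p.1])) PySem.Dict.empty
  patient2mutations.foldl (fun iP2G ent =>
    let muts := (PySem.Dict.mk patient2mutations).getD ent.1 []
    let idxs : PySem.Set Int := PySem.Set.ofList (muts.flatMap (fun g => gene2idx.getD g []))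
    iP2G ++ [PySem.List.sorted idxs (fun x => x) false]) []

-- ===== PRECONDITION & SPEC =====
def Spec_convert_p2m_to_int (patients : List String) (genes : List String) (patient2mutations : List (String × List String)) (out : List (List Int)) : Prop := out = convert_p2m_to_int_alt patients genes patient2mutations
instance (patients : List String) (genes : List String) (patient2mutations : List (String × List String)) (out : List (List Int)) : Decidable (Spec_convert_p2m_to_int patients genes patient2mutations out) := by unfold Spec_convert_p2m_to_int; infer_instance

-- ===== CLAIM (what is proved, stated in full; the proofs are below) =====
def Claim_equal_convert_p2m_to_int : Prop := ∀ (patients : List String) (genes : List String) (patient2mutations : List (String × List String)), Dom_convert_p2m_to_int patients genes patient2mutations → Spec_convert_p2m_to_int patients genes patient2mutations (convert_p2m_to_int patients genes patient2mutations)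

-- ===== LEMMAS AND PROOFS =====

-- The gene→indices dict maps g to the (increasing) list of positions of g in genes.
theorem gene2idx_getD (genes : List String) (g : String) :
    ((PySem.List.enumerate genes 0).foldl (fun d p => d.modify p.2 [] (· ++ [p.1]))
        (PySem.Dict.empty : PySem.Dict String (List Int))).getD g []
      = ((PySem.List.enumerate genes 0).filter (fun p => p.2 == g)).map (·.1) := by
  have h := PySem.Dict.getD_foldl_modify_append
      (l := (PySem.List.enumerate genes 0).map (fun p => (p.2, p.1)))
      (d := (PySem.Dict.empty : PySem.Dict String (List Int))) (c := g)
  rw [List.foldl_map] at h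
  simp only [PySem.Dict.getD_empty, List.nil_append] at h
  rw [h, List.filter_map, List.map_map]
  rfl

-- Membership in the collected index list = "i is in range and genes[i] ∈ muts".
theorem mem_flatMap_iff (genes : List String) (M : List String) (i : Int) :
    (i ∈ M.flatMap (fun g =>
        ((PySem.List.enumerate genes 0).foldl (fun d p => d.modify p.2 [] (· ++ [p.1]))
          (PySem.Dict.empty : PySem.Dict String (List Int))).getD g []))
      ↔ (0 ≤ i ∧ i < (genes.length : Int) ∧ M.contains (PySem.List.pyGetD genes i "")) := by
  simp only [gene2idx_getD]
  simp only [PySem.List.enumerate_eq_map_pyRange (d := ""), List.filter_map, List.map_map,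
    List.mem_flatMap, List.mem_map, List.mem_filter]
  constructor
  · rintro ⟨g, hg, j, ⟨hjmem, hcond⟩, hji⟩
    simp only [Function.comp, beq_iff_eq] at hcond hji
    rw [PySem.List.mem_pyRange_one] at hjmem
    subst hji
    refine ⟨hjmem.1, by simpa using hjmem.2, ?_⟩
    rw [hcond]; exact List.contains_iff_mem.mpr hg
  · rintro ⟨h0, hn, hmem⟩
    refine ⟨PySem.List.pyGetD genes i "", List.contains_iff_mem.mp hmem, i,
      ⟨PySem.List.mem_pyRange_one.mpr ⟨h0, by simpa using hn⟩, by simp⟩, rfl⟩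

-- A's row for a fixed mutation list equals B's row.
theorem row_eq (genes : List String) (M : List String) :
    PySem.List.sorted (PySem.Set.ofList (M.flatMap (fun g =>
        ((PySem.List.enumerate genes 0).foldl (fun d p => d.modify p.2 [] (· ++ [p.1]))
          (PySem.Dict.empty : PySem.Dict String (List Int))).getD g []))) (fun x => x) false
      = (PySem.List.pyRange 0 (genes.length : Int) 1).foldl (fun mg i =>
          if M.contains (PySem.List.pyGetD genes i "") then mg ++ [i] else mg) [] := by
  rw [PySem.List.foldl_append_if (p := fun i => M.contains (PySem.List.pyGetD genes i ""))
      (f := fun i => i)]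
  simp only [List.nil_append, List.map_id_fun', id]
  apply PySem.List.sorted_eq_of_perm_of_pairwise_lt
  · rw [List.perm_ext_iff_of_nodup
      (List.Nodup.filter _ (PySem.List.nodup_pyRange_one 0 (genes.length : Int)))
      (PySem.Set.nodup_ofList _)]
    intro i
    rw [PySem.Set.mem_ofList, mem_flatMap_iff, List.mem_filter, PySem.List.mem_pyRange_one]
    tauto
  · exact List.Pairwise.filter _ (PySem.List.pairwise_lt_pyRange_one 0 (genes.length : Int))

-- ===== VERDICT (by name: the statement is the Claim_ definition above) =====
theorem convert_p2m_to_int_spec : Claim_equal_convert_p2m_to_int := by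
  intro patients genes p2m _
  unfold Spec_convert_p2m_to_int convert_p2m_to_int convert_p2m_to_int_alt
  rw [PySem.List.foldl_append_singleton_eq_map, PySem.List.foldl_append_singleton_eq_map]
  simp only [List.nil_append]
  apply List.map_congr_left
  intro ent _
  exact (row_eq genes ((PySem.Dict.mk p2m).getD ent.1 [])).symm
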